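-- pv_equiv track=rewrite | github.com/343549/Algosi | 2-sem/lab1/task5/solution.py | solve
-- ===== SOURCE A (Python) =====
-- def solve(n):
--     """
--     Находит максимальное количество попарно различных натуральных чисел,
--     сумма которых равна n.
--     """
--     result = []
--     current = 1
--     remaining = n
--
--     # Жадный алгоритм: берем наименьшие числа, начиная с 1
--     while remaining >= current:
--         result.append(current)
--         remaining -= current
--         current += 1
--
--     # Если остался остаток, добавляем его к последнему числу
--     if remaining > 0:
--         result[-1] += remaining
--
--     return result
-- ===== SOURCE B (Python) =====
-- def solve(n):
--     """
--     Находит максимальное количество попарно различных натуральных чисел,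
--     сумма которых равна n.
--     """
--     if n <= 0:
--         return []
--     # binary search for the largest k with k*(k+1)//2 <= n
--     lo, hi = 0, n + 1          # invariant: T(lo) <= n < T(hi)
--     while hi - lo > 1:
--         mid = (lo + hi) // 2
--         if mid * (mid + 1) // 2 <= n:
--             lo = mid
--         else:
--             hi = mid
--     k = lo
--     result = list(range(1, k + 1))
--     rem = n - k * (k + 1) // 2
--     if rem > 0:
--         result[-1] += rem
--     return result
-- ===== Notes on version B (the rewrite author's own statement) =====
-- stated objective: alternative
-- what changed: Replaces A's greedy accumulate-until-stop loop (one iteration per output element) with a binary search for the largest k whose triangular number is at most n, then builds range(1, k+1) directly and adds the remainder to the last element.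
import Mathlib
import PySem

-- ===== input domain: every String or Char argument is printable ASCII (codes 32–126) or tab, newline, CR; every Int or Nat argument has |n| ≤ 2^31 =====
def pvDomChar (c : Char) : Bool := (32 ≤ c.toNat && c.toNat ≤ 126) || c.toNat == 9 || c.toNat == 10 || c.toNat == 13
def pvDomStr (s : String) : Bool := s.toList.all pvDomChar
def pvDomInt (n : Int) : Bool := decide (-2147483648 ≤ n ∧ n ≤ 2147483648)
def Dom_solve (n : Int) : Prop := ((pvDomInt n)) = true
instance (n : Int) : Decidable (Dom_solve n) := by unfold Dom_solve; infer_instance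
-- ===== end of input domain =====

-- B replaces A's greedy element-by-element loop with a binary search for the
-- largest k with k*(k+1)/2 <= n, then builds range(1, k+1) and adds the
-- remainder to the last element.

-- ===== PORT A =====
-- while remaining >= current: result.append(current); remaining -= current; current += 1
-- (fuel only makes the recursion total; n.toNat + 1 steps always suffice since
--  each iteration removes current ≥ 1 from remaining)
def solveLoopA (fuel : Nat) (result : List Int) (current remaining : Int) : List Int × Int :=
  match fuel with
  | 0 => (result, remaining)
  | f + 1 =>
    if current ≤ remaining then
      solveLoopA f (result ++ [current]) (current + 1) (remaining - current)
    else (result, remaining)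

def solve (n : Int) : List Int :=
  let p := solveLoopA (n.toNat + 1) [] 1 n
  let result := p.1
  let remaining := p.2
  -- result[-1] += remaining; result is nonempty whenever remaining > 0 (n ≥ 1 ⇒ the loop ran)
  if remaining > 0 then result.dropLast ++ [result.getLast?.getD 0 + remaining]
  else result

-- ===== PORT B =====
-- while hi - lo > 1: mid = (lo+hi)//2; if mid*(mid+1)//2 <= n: lo = mid else: hi = mid
-- (fuel only makes the recursion total; (hi - lo).toNat steps always suffice since
--  the interval shrinks every iteration)
def bsearchLoop (fuel : Nat) (n lo hi : Int) : Int :=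
  match fuel with
  | 0 => lo
  | f + 1 =>
    if 1 < hi - lo then
      let mid := PySem.Int.floordiv (lo + hi) 2
      if PySem.Int.floordiv (mid * (mid + 1)) 2 ≤ n then bsearchLoop f n mid hi
      else bsearchLoop f n lo mid
    else lo

def solve_alt (n : Int) : List Int :=
  if n ≤ 0 then []
  else
    let k := bsearchLoop (n + 1 - 0).toNat n 0 (n + 1)
    let result := PySem.List.pyRange 1 (k + 1) 1
    let rem := n - PySem.Int.floordiv (k * (k + 1)) 2
    -- result[-1] += rem; result is nonempty since k ≥ 1 for n ≥ 1
    if rem > 0 then result.dropLast ++ [result.getLast?.getD 0 + rem]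
    else result

-- ===== PRECONDITION & SPEC =====
def Spec_solve (n : Int) (out : List Int) : Prop := out = solve_alt n
instance (n : Int) (out : List Int) : Decidable (Spec_solve n out) := by unfold Spec_solve; infer_instance

-- ===== CLAIM (what is proved, stated in full; the proofs are below) =====
def Claim_equal_solve : Prop := ∀ (n : Int), Dom_solve n → Spec_solve n (solve n)

-- ===== LEMMAS AND PROOFS =====

/-- Sum of the j integers current, current+1, …, current+j-1. -/
def sumFrom (c : Int) : Nat → Int
  | 0 => 0
  | j + 1 => c + sumFrom (c + 1) j

theorem two_sumFrom (c : Int) (j : Nat) : 2 * sumFrom c j = j * (2 * c + j - 1) := by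
  induction j generalizing c with
  | zero => simp [sumFrom]
  | succ j ih =>
    have := ih (c + 1)
    simp only [sumFrom]
    push_cast at *
    nlinarith [this]

theorem sumFrom_nonneg (c : Int) (j : Nat) (hc : 0 ≤ c) : 0 ≤ sumFrom c j := by
  induction j generalizing c with
  | zero => simp [sumFrom]
  | succ j ih => simp only [sumFrom]; have := ih (c + 1) (by omega); omega

theorem loopA_spec (j : Nat) : ∀ (fuel : Nat) (c r : Int) (acc : List Int), j < fuel → 1 ≤ c →
    sumFrom c j ≤ r → r < sumFrom c (j + 1) →
    solveLoopA fuel acc c r = (acc ++ PySem.List.pyRange c (c + j) 1, r - sumFrom c j) := by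
  induction j with
  | zero =>
    intro fuel c r acc hf hc h1 h2
    simp only [sumFrom] at h1 h2
    obtain ⟨f, rfl⟩ : ∃ f, fuel = f + 1 := ⟨fuel - 1, by omega⟩
    rw [solveLoopA, if_neg (by omega), PySem.List.pyRange_one_eq_nil (by push_cast; omega)]
    simp [sumFrom]
  | succ j ih =>
    intro fuel c r acc hf hc h1 h2
    have hnn : 0 ≤ sumFrom (c + 1) j := sumFrom_nonneg _ _ (by omega)
    simp only [sumFrom] at h1 h2
    obtain ⟨f, rfl⟩ : ∃ f, fuel = f + 1 := ⟨fuel - 1, by omega⟩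
    rw [solveLoopA, if_pos (by omega)]
    rw [ih f (c + 1) (r - c) (acc ++ [c]) (by omega) (by omega) (by omega)
      (by simpa [sumFrom] using by omega : r - c < sumFrom (c + 1) (j + 1))]
    have hrng : PySem.List.pyRange c (c + (j + 1 : Nat)) 1 = c :: PySem.List.pyRange (c + 1) (c + 1 + j) 1 := by
      rw [PySem.List.pyRange_one_cons (by push_cast; omega)]
      congr 1
      push_cast; ring_nf
    rw [hrng]
    simp only [sumFrom, Prod.mk.injEq, List.append_assoc, List.singleton_append]
    exact ⟨trivial, by omega⟩

theorem bsearch_spec (n : Int) (fuel : Nat) : ∀ (lo hi : Int), (hi - lo).toNat ≤ fuel + 1 →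
    0 ≤ lo → lo < hi → lo * (lo + 1) ≤ 2 * n → 2 * n < hi * (hi + 1) →
    0 ≤ bsearchLoop fuel n lo hi ∧ bsearchLoop fuel n lo hi * (bsearchLoop fuel n lo hi + 1) ≤ 2 * n ∧
      2 * n < (bsearchLoop fuel n lo hi + 1) * (bsearchLoop fuel n lo hi + 2) := by
  induction fuel with
  | zero =>
    intro lo hi hfuel h0 hlt hl hh
    have : hi = lo + 1 := by omega
    subst this
    exact ⟨h0, hl, by simp only [bsearchLoop]; nlinarith [hh]⟩
  | succ f ih =>
    intro lo hi hfuel h0 hlt hl hh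
    rw [bsearchLoop]
    by_cases hgt : 1 < hi - lo
    · rw [if_pos hgt]
      set mid := PySem.Int.floordiv (lo + hi) 2 with hmid
      have hdm : mid = (lo + hi) / 2 := by
        rw [hmid, PySem.Int.floordiv_eq_ediv_of_pos (by omega)]
      have hmlo : lo < mid := by omega
      have hmhi : mid < hi := by omega
      have heven : ∃ t, mid * (mid + 1) = 2 * t := by
        rcases Int.even_mul_succ_self mid with ⟨t, ht⟩
        exact ⟨t, by omega⟩
      rcases heven with ⟨t, ht⟩
      have hfd : PySem.Int.floordiv (mid * (mid + 1)) 2 = t := by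
        rw [PySem.Int.floordiv_eq_ediv_of_pos (by omega), ht]; omega
      by_cases hle : PySem.Int.floordiv (mid * (mid + 1)) 2 ≤ n
      · rw [if_pos hle]
        exact ih mid hi (by omega) (by omega) hmhi (by omega) hh
      · rw [if_neg hle]
        exact ih lo mid (by omega) h0 hmlo hl (by omega)
    · rw [if_neg hgt]
      have : hi = lo + 1 := by omega
      subst this
      exact ⟨h0, hl, by nlinarith⟩

theorem solve_eq_alt (n : Int) : solve n = solve_alt n := by
  by_cases hn : n ≤ 0
  · have hloop : solveLoopA (n.toNat + 1) [] 1 n = ([], n) := by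
      have : n.toNat + 1 = 0 + 1 := by omega
      rw [this, solveLoopA]
      exact if_neg (by omega)
    simp [solve, solve_alt, hloop, hn]
  · rw [not_le] at hn
    obtain ⟨hk0, hkle, hklt⟩ := bsearch_spec n (n + 1 - 0).toNat 0 (n + 1) (by omega) le_rfl
      (by omega) (by omega) (by nlinarith)
    set k := bsearchLoop (n + 1 - 0).toNat n 0 (n + 1) with hk
    have hk1 : 1 ≤ k := by
      by_contra h
      have : k = 0 := by omega
      rw [this] at hklt; omega
    have hkn : k ≤ n := by nlinarith
    set j := k.toNat with hj
    have hjk : (j : Int) = k := by omega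
    have h2s : 2 * sumFrom 1 j = k * (k + 1) := by
      rw [two_sumFrom]; rw [← hjk]; ring
    have h2s' : 2 * sumFrom 1 (j + 1) = (k + 1) * (k + 2) := by
      rw [two_sumFrom]; push_cast; rw [← hjk]; ring
    have hloop := loopA_spec j (n.toNat + 1) 1 n [] (by omega) le_rfl (by omega) (by omega)
    have hrange : (1 : Int) + j = k + 1 := by omega
    have heq : ∃ t, k * (k + 1) = 2 * t := by
      rcases Int.even_mul_succ_self k with ⟨t, ht⟩; exact ⟨t, by omega⟩
    rcases heq with ⟨t, ht⟩
    have hfd : PySem.Int.floordiv (k * (k + 1)) 2 = t := by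
      rw [PySem.Int.floordiv_eq_ediv_of_pos (by omega), ht]; omega
    have hsum : sumFrom 1 j = t := by omega
    have h2 : ¬ n ≤ 0 := by omega
    simp only [solve, solve_alt, hloop, hrange, hsum, ← hk, hfd, h2, if_false,
      List.nil_append]

-- ===== VERDICT (by name: the statement is the Claim_ definition above) =====
theorem solve_spec : Claim_equal_solve := by
  intro n _
  unfold Spec_solve
  exact solve_eq_alt n
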